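-- pv_equiv track=rewrite | github.com/ekpasowecabronneta-hue/duckclaw | packages/agents/src/duckclaw/graphs/on_the_fly_commands.py | _dedupe_authorized_users_by_user_id
-- ===== SOURCE A (Python) =====
-- def _dedupe_authorized_users_by_user_id(users: list[dict[str, str]]) -> list[dict[str, str]]:
--     """
--     Unifica filas por ``user_id`` (p. ej. duplicados legacy por distinto casing de ``tenant_id`` en PK).
--     Si hay varias filas, se prioriza la que tenga rol ``admin``.
--     """
--     rank = {"admin": 3, "user": 2, "operator": 2, "observer": 1}
--
--     def _score(u: dict[str, str]) -> int:
--         r = (u.get("role") or "").strip().lower()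
--         return int(rank.get(r, 2))
--
--     best: dict[str, dict[str, str]] = {}
--     for u in users:
--         uid = str(u.get("user_id") or "").strip()
--         if not uid:
--             continue
--         if uid not in best or _score(u) > _score(best[uid]):
--             best[uid] = u
--     out = list(best.values())
--     out.sort(key=lambda x: str(x.get("user_id") or ""))
--     return out
-- ===== SOURCE B (Python) =====
-- def _dedupe_authorized_users_by_user_id(users: list[dict[str, str]]) -> list[dict[str, str]]:
--     rank = {"admin": 3, "user": 2, "operator": 2, "observer": 1}
--
--     def _score(u: dict[str, str]) -> int:
--         r = (u.get("role") or "").strip().lower()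
--         return int(rank.get(r, 2))
--
--     groups: dict[str, list[dict[str, str]]] = {}
--     for u in users:
--         uid = str(u.get("user_id") or "").strip()
--         if not uid:
--             continue
--         groups.setdefault(uid, []).append(u)
--     out = [max(g, key=_score) for g in groups.values()]
--     out.sort(key=lambda x: str(x.get("user_id") or ""))
--     return out
-- ===== Notes on version B (the rewrite author's own statement) =====
-- stated objective: alternative
-- what changed: Instead of A's running-best dict updated in place with a strict-> comparison, B builds a dict mapping each stripped user_id to the list of all its rows in one pass, then reduces each group in a second pass with max(group, key=_score) (first maximal element), and finally sorts by the unstripped user_id.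
import Mathlib
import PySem

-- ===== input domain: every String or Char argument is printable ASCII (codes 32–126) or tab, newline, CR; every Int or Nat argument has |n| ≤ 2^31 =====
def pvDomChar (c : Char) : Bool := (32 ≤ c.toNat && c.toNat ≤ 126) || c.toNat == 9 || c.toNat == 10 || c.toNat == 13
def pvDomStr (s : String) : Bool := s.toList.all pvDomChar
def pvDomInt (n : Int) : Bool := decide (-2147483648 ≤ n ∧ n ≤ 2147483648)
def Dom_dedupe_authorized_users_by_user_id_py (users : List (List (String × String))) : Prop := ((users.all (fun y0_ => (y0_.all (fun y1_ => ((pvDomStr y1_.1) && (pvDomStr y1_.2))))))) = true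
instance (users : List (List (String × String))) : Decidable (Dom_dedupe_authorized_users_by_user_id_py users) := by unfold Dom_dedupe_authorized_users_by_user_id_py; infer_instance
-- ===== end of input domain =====

-- B groups rows by stripped user_id in one pass (dict of lists), then reduces each group with
-- max(key=_score) in a second pass — an alternative decomposition of A's running-best loop; same cost.

-- shared helpers (both Pythons define the identical rank table, _score, and key expressions)
def pvRank : PySem.Dict String Int :=
  PySem.Dict.ofList [("admin", 3), ("user", 2), ("operator", 2), ("observer", 1)]

-- u.get(k) or "" : first-match association-list lookup (the dict convention), exact
def pvGetStr (u : List (String × String)) (k : String) : String :=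
  ((u.find? (fun p => p.1 == k)).map (fun p => p.2)).getD ""

def pvScore (u : List (String × String)) : Int :=
  pvRank.getD (PySem.Str.lower (PySem.Str.strip (pvGetStr u "role"))) 2

def pvUid (u : List (String × String)) : String :=
  PySem.Str.strip (pvGetStr u "user_id")

def pvSortKey (u : List (String × String)) : String := pvGetStr u "user_id"

-- ===== PORT A =====
def dedupe_authorized_users_by_user_id_py (users : List (List (String × String))) : List (List (String × String)) :=
  let best : PySem.Dict String (List (String × String)) :=
    users.foldl (fun best u =>
      let uid := pvUid u
      if uid = "" then best
      else
        match best.get? uid with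
        | none => best.insert uid u
        | some b => if pvScore u > pvScore b then best.insert uid u else best)
      PySem.Dict.empty
  PySem.List.sorted best.values pvSortKey false

-- ===== PORT B =====
def dedupe_authorized_users_by_user_id_py_alt (users : List (List (String × String))) : List (List (String × String)) :=
  let groups : PySem.Dict String (List (List (String × String))) :=
    users.foldl (fun g u =>
      let uid := pvUid u
      if uid = "" then g
      else g.modify uid [] (· ++ [u]))
      PySem.Dict.empty
  let out := groups.values.filterMap (fun gl => PySem.List.max? gl pvScore)
  PySem.List.sorted out pvSortKey false

-- ===== PRECONDITION & SPEC =====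
def Spec_dedupe_authorized_users_by_user_id_py (users : List (List (String × String))) (out : List (List (String × String))) : Prop := out = dedupe_authorized_users_by_user_id_py_alt users
instance (users : List (List (String × String))) (out : List (List (String × String))) : Decidable (Spec_dedupe_authorized_users_by_user_id_py users out) := by unfold Spec_dedupe_authorized_users_by_user_id_py; infer_instance

-- ===== CLAIM (what is proved, stated in full; the proofs are below) =====
def Claim_equal_dedupe_authorized_users_by_user_id_py : Prop := ∀ (users : List (List (String × String))), Dom_dedupe_authorized_users_by_user_id_py users → Spec_dedupe_authorized_users_by_user_id_py users (dedupe_authorized_users_by_user_id_py users)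

-- ===== LEMMAS AND PROOFS =====

-- the two loop bodies, named for the proofs (the ports use the same lambdas; defeq)
def pvStepA (best : PySem.Dict String (List (String × String))) (u : List (String × String)) :
    PySem.Dict String (List (String × String)) :=
  let uid := pvUid u
  if uid = "" then best
  else
    match best.get? uid with
    | none => best.insert uid u
    | some b => if pvScore u > pvScore b then best.insert uid u else best

def pvStepB (g : PySem.Dict String (List (List (String × String)))) (u : List (String × String)) :
    PySem.Dict String (List (List (String × String))) :=
  let uid := pvUid u
  if uid = "" then g else g.modify uid [] (· ++ [u])

-- first maximal element of a group (what max(g, key=_score) returns on a nonempty group)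
def pvPick (gl : List (List (String × String))) : List (String × String) :=
  (PySem.List.max? gl pvScore).getD []

def pvGmap (p : String × List (List (String × String))) : String × List (String × String) :=
  (p.1, pvPick p.2)

lemma pv_find?_map_gmap (l : List (String × List (List (String × String)))) (k : String) :
    (l.map pvGmap).find? (fun p => p.1 == k) = (l.find? (fun p => p.1 == k)).map pvGmap := by
  induction l with
  | nil => rfl
  | cons h t ih =>
    by_cases hk : h.1 = k
    · have hb : (h.1 == k) = true := by simp [hk]
      simp [List.find?, pvGmap, hb]
    · have hb : (h.1 == k) = false := by simp [hk]
      simp [List.find?, pvGmap, hb, ih]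

lemma pv_contains_map_gmap (l : List (String × List (List (String × String)))) (k : String) :
    (PySem.Dict.mk (l.map pvGmap)).contains k = (PySem.Dict.mk l).contains k := by
  simp only [PySem.Dict.contains, List.any_map]
  congr 1

lemma pv_get?_map_gmap (l : List (String × List (List (String × String)))) (k : String) :
    (PySem.Dict.mk (l.map pvGmap)).get? k = ((PySem.Dict.mk l).get? k).map (fun gl => pvPick gl) := by
  simp only [PySem.Dict.get?, pv_find?_map_gmap]
  cases l.find? (fun p => p.1 == k) with
  | none => rfl
  | some p => rfl

lemma pv_max?_append_some (gl : List (List (String × String))) (u m : List (String × String))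
    (h : PySem.List.max? gl pvScore = some m) :
    PySem.List.max? (gl ++ [u]) pvScore = if pvScore m < pvScore u then some u else some m := by
  simp only [PySem.List.max?] at h ⊢
  rw [List.foldl_append, h]
  simp

lemma pv_pick_append (gl : List (List (String × String))) (u : List (String × String)) (h : gl ≠ []) :
    pvPick (gl ++ [u]) = if pvScore (pvPick gl) < pvScore u then u else pvPick gl := by
  obtain ⟨m, hm⟩ : ∃ m, PySem.List.max? gl pvScore = some m := by
    cases hmx : PySem.List.max? gl pvScore with
    | none => exact absurd ((PySem.List.max?_eq_none_iff gl pvScore).mp hmx) h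
    | some m => exact ⟨m, rfl⟩
  simp only [pvPick, hm, pv_max?_append_some gl u m hm, Option.getD_some]
  split_ifs <;> rfl

-- the step commutation: A's step on the reduced dict = reduce after B's step
lemma pv_step_comm (G : PySem.Dict String (List (List (String × String)))) (u : List (String × String))
    (hnd : G.keys.Nodup) (hne : ∀ p ∈ G.items, p.2 ≠ []) :
    pvStepA (PySem.Dict.mk (G.items.map pvGmap)) u = PySem.Dict.mk ((pvStepB G u).items.map pvGmap) := by
  unfold pvStepA pvStepB
  by_cases h0 : pvUid u = ""
  · simp [h0]
  · simp only [h0, if_false, PySem.Dict.modify]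
    cases hG : G.get? (pvUid u) with
    | none =>
      have hc : G.contains (pvUid u) = false := by
        by_contra hcc
        have := (PySem.Dict.get?_eq_none_iff_contains (d := G) (k := pvUid u)).mp hG
        simp_all
      have hc' : (PySem.Dict.mk (G.items.map pvGmap)).contains (pvUid u) = false := by
        rw [pv_contains_map_gmap]; cases G; exact hc
      have hget : (PySem.Dict.mk (G.items.map pvGmap)).get? (pvUid u) = none := by
        rw [pv_get?_map_gmap]; cases G; simp [hG]
      rw [hget]
      have hD : G.getD (pvUid u) [] = [] := by simp [PySem.Dict.getD, hG]
      apply PySem.Dict.ext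
      rw [PySem.Dict.items_insert_of_not_contains _ _ hc']
      rw [hD, PySem.Dict.items_insert_of_not_contains _ _ hc]
      simp [pvGmap, pvPick, PySem.List.max?]
    | some gl =>
      have hc : G.contains (pvUid u) = true := by
        by_contra hcc
        have hf : G.contains (pvUid u) = false := by simpa using hcc
        have := (PySem.Dict.get?_eq_none_iff_contains (d := G) (k := pvUid u)).mpr hf
        simp_all
      have hglne : gl ≠ [] := by
        have hmem := PySem.Dict.mem_items_of_get?_eq_some (d := G) hG
        exact hne _ hmem
      have hc' : (PySem.Dict.mk (G.items.map pvGmap)).contains (pvUid u) = true := by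
        rw [pv_contains_map_gmap]; cases G; exact hc
      have hget : (PySem.Dict.mk (G.items.map pvGmap)).get? (pvUid u) = some (pvPick gl) := by
        rw [pv_get?_map_gmap]; cases G; simp [hG]
      rw [hget]
      have hD : G.getD (pvUid u) [] = gl := by simp [PySem.Dict.getD, hG]
      rw [hD]
      apply PySem.Dict.ext
      rw [PySem.Dict.items_insert_of_contains _ _ hc]
      have hpk : pvPick (gl ++ [u]) = if pvScore (pvPick gl) < pvScore u then u else pvPick gl :=
        pv_pick_append gl u hglne
      by_cases hs : pvScore (pvPick gl) < pvScore u
      · have : pvScore u > pvScore (pvPick gl) := hs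
        simp only [gt_iff_lt, hs, if_true]
        rw [PySem.Dict.items_insert_of_contains _ _ hc']
        simp only [List.map_map]
        apply List.map_congr_left
        intro p _
        by_cases hk : p.1 = pvUid u
        · simp [Function.comp, pvGmap, hk, hpk, hs]
        · simp [Function.comp, pvGmap, hk]
      · simp only [gt_iff_lt, hs, if_false]
        simp only [List.map_map]
        apply Eq.symm
        apply List.map_congr_left
        intro p hp
        by_cases hk : p.1 = pvUid u
        · -- unique keys: the entry at pvUid u has value gl
          have : G.get? p.1 = some p.2 := PySem.Dict.get?_of_mem_items G hp hnd
          rw [hk] at this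
          rw [hG] at this
          have hp2 : p.2 = gl := by injection this.symm
          simp [Function.comp, pvGmap, hk, hpk, hs, hp2]
        · simp [Function.comp, pvGmap, hk]

lemma pv_stepB_nodup (G : PySem.Dict String (List (List (String × String)))) (u : List (String × String))
    (hnd : G.keys.Nodup) : (pvStepB G u).keys.Nodup := by
  unfold pvStepB
  by_cases h0 : pvUid u = ""
  · simpa [h0]
  · simp only [h0, if_false, PySem.Dict.modify]
    exact PySem.Dict.nodup_keys_insert _ _ _ hnd

lemma pv_stepB_nonempty (G : PySem.Dict String (List (List (String × String)))) (u : List (String × String))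
    (hne : ∀ p ∈ G.items, p.2 ≠ []) : ∀ p ∈ (pvStepB G u).items, p.2 ≠ [] := by
  unfold pvStepB
  by_cases h0 : pvUid u = ""
  · simpa [h0] using hne
  · simp only [h0, if_false, PySem.Dict.modify]
    intro p hp
    rcases (PySem.Dict.mem_items_insert _ _ _ _).mp hp with h | ⟨h, _⟩
    · subst h; simp
    · exact hne _ h

lemma pv_foldB_nonempty (users : List (List (String × String))) :
    ∀ (G : PySem.Dict String (List (List (String × String)))),
      (∀ p ∈ G.items, p.2 ≠ []) → ∀ p ∈ (users.foldl pvStepB G).items, p.2 ≠ [] := by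
  induction users with
  | nil => intro G h; exact h
  | cons u t ih =>
    intro G h
    simp only [List.foldl_cons]
    exact ih (pvStepB G u) (pv_stepB_nonempty G u h)

lemma pv_loop_eq (users : List (List (String × String))) :
    ∀ (G : PySem.Dict String (List (List (String × String)))),
      G.keys.Nodup → (∀ p ∈ G.items, p.2 ≠ []) →
      users.foldl pvStepA (PySem.Dict.mk (G.items.map pvGmap)) =
        PySem.Dict.mk ((users.foldl pvStepB G).items.map pvGmap) := by
  induction users with
  | nil => intro G _ _; rfl
  | cons u t ih =>
    intro G hnd hne
    simp only [List.foldl_cons]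
    rw [pv_step_comm G u hnd hne]
    exact ih (pvStepB G u) (pv_stepB_nodup G u hnd) (pv_stepB_nonempty G u hne)

lemma pv_filterMap_max?_eq_map_pick (l : List (String × List (List (String × String))))
    (hne : ∀ p ∈ l, p.2 ≠ []) :
    (l.map (fun p => p.2)).filterMap (fun gl => PySem.List.max? gl pvScore) =
      l.map (fun p => pvPick p.2) := by
  induction l with
  | nil => rfl
  | cons h t ih =>
    have hh : h.2 ≠ [] := hne h (List.mem_cons_self)
    obtain ⟨m, hm⟩ : ∃ m, PySem.List.max? h.2 pvScore = some m := by
      cases hmx : PySem.List.max? h.2 pvScore with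
      | none => exact absurd ((PySem.List.max?_eq_none_iff _ _).mp hmx) hh
      | some m => exact ⟨m, rfl⟩
    simp only [List.map_cons, List.filterMap_cons, hm]
    rw [ih (fun p hp => hne p (List.mem_cons_of_mem _ hp))]
    simp [pvPick, hm]

-- ===== VERDICT (by name: the statement is the Claim_ definition above) =====
theorem dedupe_authorized_users_by_user_id_py_spec : Claim_equal_dedupe_authorized_users_by_user_id_py := by
  intro users _
  unfold Spec_dedupe_authorized_users_by_user_id_py
  show PySem.List.sorted (users.foldl pvStepA PySem.Dict.empty).values pvSortKey false =
    PySem.List.sorted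
      ((users.foldl pvStepB PySem.Dict.empty).values.filterMap (fun gl => PySem.List.max? gl pvScore))
      pvSortKey false
  have h0 : (PySem.Dict.empty : PySem.Dict String (List (List (String × String)))).keys.Nodup := by
    simp [PySem.Dict.empty, PySem.Dict.keys]
  have h1 : ∀ p ∈ (PySem.Dict.empty : PySem.Dict String (List (List (String × String)))).items, p.2 ≠ [] := by
    simp [PySem.Dict.empty]
  have hloop := pv_loop_eq users PySem.Dict.empty h0 h1
  have hempty : (PySem.Dict.empty : PySem.Dict String (List (String × String))) =
      PySem.Dict.mk (((PySem.Dict.empty : PySem.Dict String (List (List (String × String)))).items).map pvGmap) := rfl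
  rw [hempty, hloop]
  have hne' : ∀ p ∈ (users.foldl pvStepB PySem.Dict.empty).items, p.2 ≠ [] :=
    pv_foldB_nonempty users PySem.Dict.empty h1
  congr 1
  show ((users.foldl pvStepB PySem.Dict.empty).items.map pvGmap).map (fun p => p.2) =
    ((users.foldl pvStepB PySem.Dict.empty).items.map (fun p => p.2)).filterMap
      (fun gl => PySem.List.max? gl pvScore)
  rw [pv_filterMap_max?_eq_map_pick _ hne']
  simp [pvGmap]
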